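-- pv_equiv track=rewrite | github.com/bojiang3/leetcodecontest | 2644.py | maxDivScore
-- ===== SOURCE A (Python) =====
-- from typing import List
--
-- def maxDivScore(nums: List[int], divisors: List[int]) -> int:
--
--     scores = []
--     for i in range(len(divisors)):
--         d = divisors[i]
--         score = 0
--         for n in nums:
--             if n % d == 0:
--                 score += 1
--         scores.append((score, i))
--
--
--     scores.sort(reverse=True)
--
--     maxx = scores[0][0]
--     toReturn = set()
--     for pair in scores:
--         if pair[0] == maxx:
--             i = pair[1]
--             toReturn.add(divisors[i])
--         else:
--             break
--
--     return min(toReturn)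
-- ===== SOURCE B (Python) =====
-- from typing import List
--
-- def maxDivScore(nums: List[int], divisors: List[int]) -> int:
--     best_score = -1
--     best_div = None
--     for d in divisors:
--         score = sum(1 for n in nums if n % d == 0)
--         if score > best_score:
--             best_score = score
--             best_div = d
--         elif score == best_score and d < best_div:
--             best_div = d
--     return best_div
-- ===== Notes on version B (the rewrite author's own statement) =====
-- stated objective: simpler
-- what changed: Instead of building a (score,index) list, sorting it in reverse, scanning the sorted prefix into a set and taking its min, B keeps two scalars (best score, best divisor with min-value tie-break) in a single pass over divisors.
import Mathlib
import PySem

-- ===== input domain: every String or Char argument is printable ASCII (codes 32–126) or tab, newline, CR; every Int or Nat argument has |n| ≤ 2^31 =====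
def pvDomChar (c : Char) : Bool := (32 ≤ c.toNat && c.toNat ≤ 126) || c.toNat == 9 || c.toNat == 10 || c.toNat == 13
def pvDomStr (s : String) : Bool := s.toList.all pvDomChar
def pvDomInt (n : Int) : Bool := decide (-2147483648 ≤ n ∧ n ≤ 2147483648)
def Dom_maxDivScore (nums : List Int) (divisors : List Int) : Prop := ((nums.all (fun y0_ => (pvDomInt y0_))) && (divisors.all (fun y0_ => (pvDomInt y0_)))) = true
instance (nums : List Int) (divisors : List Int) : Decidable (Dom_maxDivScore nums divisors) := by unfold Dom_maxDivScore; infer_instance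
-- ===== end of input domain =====

-- B replaces A's append/sort/prefix-scan-into-a-set/min pipeline by a single pass over divisors
-- keeping two scalars (best count, smallest divisor attaining it); objective: simpler. Return value only.

-- ===== PORT A =====
-- the 'for pair in scores: … else: break' loop of A (stops at the first pair whose score ≠ maxx)
def maxDivScoreCollect (divisors : List Int) (maxx : Int) : List (Int × Int) → PySem.Set Int → PySem.Set Int
  | [], s => s
  | p :: t, s =>
      if p.1 = maxx then maxDivScoreCollect divisors maxx t (PySem.Set.add s (PySem.List.pyGetD divisors p.2 0))
      else s

def maxDivScore (nums : List Int) (divisors : List Int) : Int :=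
  let scores : List (Int × Int) :=
    (PySem.List.pyRange 0 (PySem.List.len divisors) 1).foldl
      (fun scores i =>
        let d := PySem.List.pyGetD divisors i 0
        let score := nums.foldl (fun score n => if PySem.Int.mod n d = 0 then score + 1 else score) 0
        scores ++ [(score, i)]) []
  let scores := PySem.List.sorted2 scores (fun p => p.1) (fun p => p.2) true
  -- scores[0][0]: IndexError on empty divisors, excluded by Pre_
  let maxx := ((PySem.List.pyGet? scores 0).getD (0, 0)).1
  let toReturn := maxDivScoreCollect divisors maxx scores PySem.Set.empty
  -- min(toReturn): min of a set of ints, order-independent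
  (PySem.List.min? toReturn (fun x => x)).getD 0

-- ===== PORT B =====
-- loop body of B: update (best_score, best_div) with divisor d
def maxDivScoreStep (nums : List Int) (st : Int × Option Int) (d : Int) : Int × Option Int :=
  let score := nums.foldl (fun s n => if PySem.Int.mod n d = 0 then s + 1 else s) 0
  if score > st.1 then (score, some d)
  else
    -- Python's 'elif score == best_score and d < best_div'; best_div = None is unreachable
    -- in that branch (score ≥ 0 > -1), so the none case just keeps the state
    match st.2 with
    | some b => if score = st.1 ∧ d < b then (st.1, some d) else (st.1, some b)
    | none => (st.1, none)

def maxDivScore_alt (nums : List Int) (divisors : List Int) : Int :=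
  -- on empty divisors B's Python returns None, not an int: excluded by Pre_
  ((divisors.foldl (maxDivScoreStep nums) (-1, none)).2).getD 0

-- ===== PRECONDITION & SPEC =====
-- Pre_ excludes exactly the inputs where A raises: empty divisors (IndexError on scores[0]),
-- and a zero divisor with nonempty nums (ZeroDivisionError in n % 0; with empty nums no mod is evaluated)
def Pre_maxDivScore (nums : List Int) (divisors : List Int) : Prop :=
  divisors ≠ [] ∧ ((0 : Int) ∈ divisors → nums = [])
instance (nums : List Int) (divisors : List Int) : Decidable (Pre_maxDivScore nums divisors) := by
  unfold Pre_maxDivScore; infer_instance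

def pvWitness_maxDivScore : List Int × List Int := ([6, 4, 9], [2, 3, 3])

def Spec_maxDivScore (nums : List Int) (divisors : List Int) (out : Int) : Prop := out = maxDivScore_alt nums divisors
instance (nums : List Int) (divisors : List Int) (out : Int) : Decidable (Spec_maxDivScore nums divisors out) := by unfold Spec_maxDivScore; infer_instance

-- ===== CLAIM (what is proved, stated in full; the proofs are below) =====
def Claim_equal_maxDivScore : Prop := ∀ (nums : List Int) (divisors : List Int), Dom_maxDivScore nums divisors → Pre_maxDivScore nums divisors → Spec_maxDivScore nums divisors (maxDivScore nums divisors)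

-- ===== LEMMAS AND PROOFS =====

-- the count both programs compute for a divisor d
def cntDiv (nums : List Int) (d : Int) : Int :=
  nums.foldl (fun s n => if PySem.Int.mod n d = 0 then s + 1 else s) 0

lemma cnt_le_foldl (nums : List Int) (d : Int) :
    ∀ init : Int, init ≤ nums.foldl (fun s n => if PySem.Int.mod n d = 0 then s + 1 else s) init := by
  induction nums with
  | nil => intro init; simp
  | cons n t ih =>
      intro init
      exact le_trans (by dsimp; split <;> omega) (ih _)

lemma cntDiv_nonneg (nums : List Int) (d : Int) : 0 ≤ cntDiv nums d :=
  cnt_le_foldl nums d 0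

-- the unsorted scores list A builds
def scoresList (nums : List Int) (divisors : List Int) : List (Int × Int) :=
  (PySem.List.pyRange 0 (PySem.List.len divisors) 1).map
    (fun i => (cntDiv nums (PySem.List.pyGetD divisors i 0), i))

lemma foldl_append_map {α β : Type} (f : α → β) (xs : List α) (acc : List β) :
    xs.foldl (fun acc x => acc ++ [f x]) acc = acc ++ xs.map f := by
  induction xs generalizing acc with
  | nil => simp
  | cons x t ih => simp [ih]

lemma maxDivScore_eq (nums divisors : List Int) :
    maxDivScore nums divisors =
      (let ss := PySem.List.sorted2 (scoresList nums divisors) (fun p => p.1) (fun p => p.2) true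
       let maxx := ((PySem.List.pyGet? ss 0).getD (0, 0)).1
       (PySem.List.min? (maxDivScoreCollect divisors maxx ss PySem.Set.empty) (fun x => x)).getD 0) := by
  unfold maxDivScore scoresList cntDiv
  dsimp only
  rw [foldl_append_map (fun i => (nums.foldl (fun score n => if PySem.Int.mod n (PySem.List.pyGetD divisors i 0) = 0 then score + 1 else score) 0, i))
        (PySem.List.pyRange 0 (PySem.List.len divisors) 1) []]
  simp only [List.nil_append]

-- ordering: sorted2 … reverse=True is pairwise descending in the first key
def befA : (Int × Int) → (Int × Int) → Bool := fun a b =>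
  (decide (b.1 < a.1) || (!decide (a.1 < b.1) && decide (b.2 < a.2)))

lemma befA_true_fst {x y : Int × Int} (h : befA x y = true) : y.1 ≤ x.1 := by
  unfold befA at h
  simp only [Bool.or_eq_true, Bool.and_eq_true, Bool.not_eq_true', decide_eq_true_eq,
    decide_eq_false_iff_not] at h
  rcases h with h | ⟨h, _⟩ <;> omega

lemma befA_false_fst {x y : Int × Int} (h : befA x y = false) : x.1 ≤ y.1 := by
  unfold befA at h
  simp only [Bool.or_eq_false_iff, Bool.and_eq_false_iff, Bool.not_eq_false',
    decide_eq_true_eq, decide_eq_false_iff_not] at h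
  omega

lemma insertBy_befA_pairwise (x : Int × Int) (ys : List (Int × Int))
    (h : ys.Pairwise (fun a b => b.1 ≤ a.1)) :
    (PySem.List.insertBy befA x ys).Pairwise (fun a b => b.1 ≤ a.1) := by
  induction ys with
  | nil => simp [PySem.List.insertBy]
  | cons y t ih =>
      rw [List.pairwise_cons] at h
      by_cases hb : befA x y = true
      · rw [show PySem.List.insertBy befA x (y :: t) = x :: y :: t by
            simp [PySem.List.insertBy, hb]]
        refine List.Pairwise.cons ?_ (List.Pairwise.cons h.1 h.2)
        intro b hbmem
        rcases List.mem_cons.mp hbmem with rfl | hbt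
        · exact befA_true_fst hb
        · exact le_trans (h.1 b hbt) (befA_true_fst hb)
      · rw [show PySem.List.insertBy befA x (y :: t) = y :: PySem.List.insertBy befA x t by
            simp [PySem.List.insertBy, hb]]
        refine List.Pairwise.cons ?_ (ih h.2)
        intro b hbmem
        rcases (PySem.List.insertBy_mem_iff befA x b t).mp hbmem with rfl | hbt
        · exact befA_false_fst (by simpa using hb)
        · exact h.1 b hbt

lemma foldl_insertBy_pairwise (xs : List (Int × Int)) :
    ∀ acc : List (Int × Int), acc.Pairwise (fun a b => b.1 ≤ a.1) →
      (xs.foldl (fun acc x => PySem.List.insertBy befA x acc) acc).Pairwise (fun a b => b.1 ≤ a.1) := by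
  induction xs with
  | nil => intro acc h; simpa using h
  | cons x t ih => intro acc h; exact ih _ (insertBy_befA_pairwise x acc h)

lemma sorted2_rev_pairwise_fst (xs : List (Int × Int)) :
    (PySem.List.sorted2 xs (fun p => p.1) (fun p => p.2) true).Pairwise (fun a b => b.1 ≤ a.1) := by
  show (xs.foldl (fun acc x => PySem.List.insertBy befA x acc) []).Pairwise _
  exact foldl_insertBy_pairwise xs [] (by simp)

-- membership in the set built by A's break-loop, over a descending list bounded by maxx
lemma mem_collect (divisors : List Int) (maxx : Int) :
    ∀ (l : List (Int × Int)) (s : PySem.Set Int),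
      l.Pairwise (fun a b => b.1 ≤ a.1) → (∀ p ∈ l, p.1 ≤ maxx) →
      ∀ y : Int, (y ∈ maxDivScoreCollect divisors maxx l s ↔
        y ∈ s ∨ ∃ p ∈ l, p.1 = maxx ∧ PySem.List.pyGetD divisors p.2 0 = y) := by
  intro l
  induction l with
  | nil => intro s _ _ y; simp [maxDivScoreCollect]
  | cons p t ih =>
      intro s hdesc hub y
      rw [List.pairwise_cons] at hdesc
      by_cases hp : p.1 = maxx
      · rw [show maxDivScoreCollect divisors maxx (p :: t) s =
              maxDivScoreCollect divisors maxx t (PySem.Set.add s (PySem.List.pyGetD divisors p.2 0)) by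
            simp [maxDivScoreCollect, hp]]
        rw [ih _ hdesc.2 (fun q hq => hub q (List.mem_cons_of_mem _ hq)) y]
        rw [PySem.Set.mem_add]
        constructor
        · rintro ((hs | he) | ⟨q, hq, hq1, hq2⟩)
          · exact Or.inl hs
          · exact Or.inr ⟨p, List.mem_cons_self, hp, he.symm⟩
          · exact Or.inr ⟨q, List.mem_cons_of_mem _ hq, hq1, hq2⟩
        · rintro (hs | ⟨q, hq, hq1, hq2⟩)
          · exact Or.inl (Or.inl hs)
          · rcases List.mem_cons.mp hq with rfl | hqt
            · exact Or.inl (Or.inr hq2.symm)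
            · exact Or.inr ⟨q, hqt, hq1, hq2⟩
      · rw [show maxDivScoreCollect divisors maxx (p :: t) s = s by
            simp [maxDivScoreCollect, hp]]
        constructor
        · exact Or.inl
        · rintro (hs | ⟨q, hq, hq1, hq2⟩)
          · exact hs
          · exfalso
            rcases List.mem_cons.mp hq with rfl | hqt
            · exact hp hq1
            · have h1 : q.1 ≤ p.1 := hdesc.1 q hqt
              have h2 : p.1 ≤ maxx := hub p List.mem_cons_self
              omega

lemma step_eq (nums : List Int) (st : Int × Option Int) (d : Int) :
    maxDivScoreStep nums st d =
      if st.1 < cntDiv nums d then (cntDiv nums d, some d)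
      else match st.2 with
        | some b => if cntDiv nums d = st.1 ∧ d < b then (st.1, some d) else (st.1, some b)
        | none => (st.1, none) := rfl

-- B-side: full characterisation of the fold state
lemma foldB_inv (nums : List Int) (ds : List Int) (hne : ds ≠ []) :
    ∃ bs bd, ds.foldl (maxDivScoreStep nums) (-1, none) = (bs, some bd) ∧
      bd ∈ ds ∧ cntDiv nums bd = bs ∧
      (∀ d ∈ ds, cntDiv nums d ≤ bs) ∧
      (∀ d ∈ ds, cntDiv nums d = bs → bd ≤ d) := by
  induction ds using List.reverseRecOn with
  | nil => exact absurd rfl hne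
  | append_singleton ds d ih =>
      rw [List.foldl_append]
      by_cases hds : ds = []
      · subst hds
        refine ⟨cntDiv nums d, d, ?_, by simp, rfl, by simp, by simp⟩
        have h0 : 0 ≤ cntDiv nums d := cntDiv_nonneg nums d
        simp only [List.foldl_cons, List.foldl_nil, step_eq]
        rw [if_pos (by show (-1 : Int) < cntDiv nums d; omega)]
      · obtain ⟨bs, bd, heq, hmem, hcnt, hub, hmin⟩ := ih hds
        rw [heq]
        by_cases hgt : bs < cntDiv nums d
        · refine ⟨cntDiv nums d, d, ?_, by simp, rfl, ?_, ?_⟩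
          · simp only [List.foldl_cons, List.foldl_nil, step_eq]
            rw [if_pos hgt]
          · intro d' hd'
            rcases List.mem_append.mp hd' with h | h
            · exact le_trans (hub d' h) (le_of_lt hgt)
            · simp at h; subst h; exact le_refl _
          · intro d' hd' hc
            rcases List.mem_append.mp hd' with h | h
            · exact absurd hc (by have := hub d' h; omega)
            · simp at h; subst h; omega
        · by_cases htie : cntDiv nums d = bs ∧ d < bd
          · refine ⟨bs, d, ?_, by simp, by omega, ?_, ?_⟩
            · simp only [List.foldl_cons, List.foldl_nil, step_eq]
              rw [if_neg (by omega)]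
              simp [htie.1, htie.2]
            · intro d' hd'
              rcases List.mem_append.mp hd' with h | h
              · exact hub d' h
              · simp at h; subst h; omega
            · intro d' hd' hc
              rcases List.mem_append.mp hd' with h | h
              · exact le_trans (le_of_lt htie.2) (hmin d' h hc)
              · simp at h; subst h; omega
          · refine ⟨bs, bd, ?_, List.mem_append.mpr (Or.inl hmem), hcnt, ?_, ?_⟩
            · simp only [List.foldl_cons, List.foldl_nil, step_eq]
              rw [if_neg (by omega)]
              show (if cntDiv nums d = bs ∧ d < bd then ((bs : Int), some d) else (bs, some bd)) = (bs, some bd)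
              rw [if_neg htie]
            · intro d' hd'
              rcases List.mem_append.mp hd' with h | h
              · exact hub d' h
              · simp at h; subst h; omega
            · intro d' hd' hc
              rcases List.mem_append.mp hd' with h | h
              · exact hmin d' h hc
              · simp at h; subst h
                by_cases hdb : bd ≤ d'
                · exact hdb
                · exact absurd ⟨hc, by omega⟩ htie

-- a divisor value d ∈ divisors occurs at some index, and conversely
lemma mem_divisors_iff (divisors : List Int) (y : Int) :
    y ∈ divisors ↔ ∃ i ∈ PySem.List.pyRange 0 (PySem.List.len divisors) 1,
      PySem.List.pyGetD divisors i 0 = y := by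
  constructor
  · intro hy
    have := PySem.List.map_pyGetD_pyRange_zero divisors (0 : Int)
    rw [← this] at hy
    rcases List.mem_map.mp hy with ⟨i, hi, hval⟩
    exact ⟨i, hi, hval⟩
  · rintro ⟨i, hi, rfl⟩
    have hmap := PySem.List.map_pyGetD_pyRange_zero divisors (0 : Int)
    have hmem : PySem.List.pyGetD divisors i 0 ∈
        List.map (fun j => PySem.List.pyGetD divisors j 0)
          (PySem.List.pyRange 0 (PySem.List.len divisors) 1) :=
      List.mem_map.mpr ⟨i, hi, rfl⟩
    rwa [hmap] at hmem

-- ===== VERDICT (by name: the statement is the Claim_ definition above) =====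
theorem maxDivScore_spec : Claim_equal_maxDivScore := by
  intro nums divisors _ hpre
  obtain ⟨hne, -⟩ := hpre
  unfold Spec_maxDivScore
  rw [maxDivScore_eq]
  obtain ⟨bs, bd, heqB, hbdmem, hbdcnt, hubB, hminB⟩ := foldB_inv nums divisors hne
  unfold maxDivScore_alt
  rw [heqB]
  simp only [Option.getD_some]
  have hperm : (PySem.List.sorted2 (scoresList nums divisors) (fun p => p.1) (fun p => p.2) true).Perm
      (scoresList nums divisors) :=
    PySem.List.sorted2_perm _ _ _ _
  have hdesc := sorted2_rev_pairwise_fst (scoresList nums divisors)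
  have hslne : scoresList nums divisors ≠ [] := by
    unfold scoresList
    simp only [ne_eq, List.map_eq_nil_iff]
    intro hr
    have := PySem.List.length_pyRange_one (0 : Int) (PySem.List.len divisors)
    rw [hr] at this
    simp [PySem.List.len_eq] at this
    exact hne (List.eq_nil_of_length_eq_zero (by omega))
  cases hssc : PySem.List.sorted2 (scoresList nums divisors) (fun p => p.1) (fun p => p.2) true with
  | nil =>
      rw [hssc] at hperm
      exact absurd (List.Perm.nil_eq hperm).symm hslne
  | cons q t =>
      rw [hssc] at hperm hdesc
      -- 'scores[0]' on the cons list is q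
      have hget : ((PySem.List.pyGet? (q :: t) 0).getD (0, 0)) = q := by
        simp [PySem.List.pyGet?, PySem.List.pyIdx?]
      rw [hget]
      rw [List.pairwise_cons] at hdesc
      -- q.1 bounds every score
      have hubss : ∀ p ∈ q :: t, p.1 ≤ q.1 := by
        intro p hp
        rcases List.mem_cons.mp hp with rfl | hpt
        · exact le_refl _
        · exact hdesc.1 p hpt
      have hubdiv : ∀ d ∈ divisors, cntDiv nums d ≤ q.1 := by
        intro d hd
        rcases (mem_divisors_iff divisors d).mp hd with ⟨i, hi, hval⟩
        have hmem : (cntDiv nums d, i) ∈ scoresList nums divisors := by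
          unfold scoresList
          exact List.mem_map.mpr ⟨i, hi, by rw [hval]⟩
        exact hubss _ (hperm.symm.subset hmem)
      -- q.1 is attained by some divisor
      have hqmem : q ∈ scoresList nums divisors := hperm.subset List.mem_cons_self
      obtain ⟨iq, hiq, hq⟩ := List.mem_map.mp hqmem
      have hdq : PySem.List.pyGetD divisors iq 0 ∈ divisors :=
        (mem_divisors_iff divisors _).mpr ⟨iq, hiq, rfl⟩
      have hqcnt : cntDiv nums (PySem.List.pyGetD divisors iq 0) = q.1 := by rw [← hq]
      -- the two maxima agree
      have hmax : q.1 = bs := by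
        have h1 : bs ≤ q.1 := hbdcnt ▸ hubdiv bd hbdmem
        have h2 : q.1 ≤ bs := hqcnt ▸ hubB _ hdq
        omega
      -- membership in the collected set
      have hmemS : ∀ y : Int, y ∈ maxDivScoreCollect divisors q.1 (q :: t) PySem.Set.empty ↔
          y ∈ divisors ∧ cntDiv nums y = q.1 := by
        intro y
        rw [mem_collect divisors q.1 (q :: t) PySem.Set.empty
              (List.pairwise_cons.mpr hdesc) hubss y]
        constructor
        · rintro (hy | ⟨p, hp, hp1, hp2⟩)
          · exact absurd hy (by simp [PySem.Set.empty])
          · have hpsl : p ∈ scoresList nums divisors := hperm.subset hp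
            obtain ⟨i, hi, hpi⟩ := List.mem_map.mp hpsl
            refine ⟨?_, ?_⟩
            · rw [← hp2, ← hpi]
              exact (mem_divisors_iff divisors _).mpr ⟨i, hi, rfl⟩
            · rw [← hp2, ← hpi]
              rw [← hpi] at hp1
              simpa using hp1
        · rintro ⟨hy, hc⟩
          rcases (mem_divisors_iff divisors y).mp hy with ⟨i, hi, hval⟩
          refine Or.inr ⟨(cntDiv nums y, i), ?_, by simpa using hc, by simpa using hval⟩
          refine hperm.symm.subset ?_
          unfold scoresList
          exact List.mem_map.mpr ⟨i, hi, by rw [hval]⟩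
      -- bd is in the set, so min? returns some m
      have hbdS : bd ∈ maxDivScoreCollect divisors q.1 (q :: t) PySem.Set.empty :=
        (hmemS bd).mpr ⟨hbdmem, by omega⟩
      cases hm : PySem.List.min? (maxDivScoreCollect divisors q.1 (q :: t) PySem.Set.empty)
          (fun x => x) with
      | none =>
          rw [PySem.List.min?_eq_none_iff] at hm
          rw [hm] at hbdS
          exact absurd hbdS (List.not_mem_nil)
      | some m =>
          have hmS := PySem.List.min?_mem hm
          have hmle : m ≤ bd := PySem.List.min?_isMin hm bd hbdS
          obtain ⟨hmdiv, hmcnt⟩ := (hmemS m).mp hmS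
          have hbdle : bd ≤ m := hminB m hmdiv (by omega)
          simp only [Option.getD_some]
          omega
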